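-- pv_equiv track=rewrite | github.com/zhangbaomu/consensus | train/scripts/eval_raw_read.py | _compute_alignment_stats
-- ===== SOURCE A (Python) =====
-- from typing import Any, Dict, List, Mapping, Optional, Sequence, Tuple
--
-- def _compute_alignment_stats(reference: str, hypothesis: str) -> Tuple[int, int, int, int]:
--     ref_len = len(reference)
--     hyp_len = len(hypothesis)
--
--     if ref_len == 0 and hyp_len == 0:
--         return 0, 0, 0, 0
--
--     dp = [[0] * (hyp_len + 1) for _ in range(ref_len + 1)]
--     back: List[List[str]] = [["" for _ in range(hyp_len + 1)] for _ in range(ref_len + 1)]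
--
--     for i in range(1, ref_len + 1):
--         dp[i][0] = i
--         back[i][0] = "D"
--     for j in range(1, hyp_len + 1):
--         dp[0][j] = j
--         back[0][j] = "I"
--
--     for i in range(1, ref_len + 1):
--         ref_char = reference[i - 1]
--         for j in range(1, hyp_len + 1):
--             hyp_char = hypothesis[j - 1]
--             substitution_cost = dp[i - 1][j - 1] + (0 if ref_char == hyp_char else 1)
--             deletion_cost = dp[i - 1][j] + 1
--             insertion_cost = dp[i][j - 1] + 1
--
--             best_cost = substitution_cost
--             op = "M" if ref_char == hyp_char else "S"
--             if deletion_cost < best_cost: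
--                 best_cost = deletion_cost
--                 op = "D"
--             if insertion_cost < best_cost:
--                 best_cost = insertion_cost
--                 op = "I"
--
--             dp[i][j] = best_cost
--             back[i][j] = op
--
--     distance = dp[ref_len][hyp_len]
--     matches = 0
--     alignment_length = 0
--
--     i, j = ref_len, hyp_len
--     while i > 0 or j > 0:
--         op = back[i][j]
--         if op in {"M", "S"}:
--             if op == "M":
--                 matches += 1
--             i -= 1
--             j -= 1
--         elif op == "D":
--             i -= 1
--         elif op == "I":
--             j -= 1
--         else:
--             break
--         alignment_length += 1
--
--     return distance, alignment_length, matches, ref_len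
-- ===== SOURCE B (Python) =====
-- from typing import Tuple
--
-- def _compute_alignment_stats(reference: str, hypothesis: str) -> Tuple[int, int, int, int]:
--     R, H = len(reference), len(hypothesis)
--     # single forward pass: each cell carries (cost, alignment_length, matches)
--     # of the canonical optimal path to it (same strict-less priority as the
--     # classic backpointer traceback); no back matrix, no traceback phase,
--     # only a rolling row of triples.
--     prev = [(j, j, 0) for j in range(H + 1)]
--     for i in range(1, R + 1):
--         rc = reference[i - 1]
--         cur = [(i, i, 0)]
--         for j in range(1, H + 1):
--             same = rc == hypothesis[j - 1]
--             dc, dal, dm = prev[j - 1]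
--             uc, ual, um = prev[j]
--             lc, lal, lm = cur[j - 1]
--             sub, dele, ins = dc + (0 if same else 1), uc + 1, lc + 1
--             if ins < sub and ins < dele:
--                 cur.append((ins, lal + 1, lm))
--             elif dele < sub:
--                 cur.append((dele, ual + 1, um))
--             else:
--                 cur.append((sub, dal + 1, dm + (1 if same else 0)))
--         prev = cur
--     cost, al, m = prev[H]
--     return cost, al, m, R
-- ===== Notes on version B (the rewrite author's own statement) =====
-- stated objective: alternative
-- what changed: B has no backpointer matrix and no traceback phase: a single forward DP pass over a rolling row of (cost, alignment_length, matches) triples propagates the stats of the canonical optimal path (same strict-less move priority) and reads the answer off the final cell, in O(hyp_len) memory instead of two full matrices plus a backward walk.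
import Mathlib
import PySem

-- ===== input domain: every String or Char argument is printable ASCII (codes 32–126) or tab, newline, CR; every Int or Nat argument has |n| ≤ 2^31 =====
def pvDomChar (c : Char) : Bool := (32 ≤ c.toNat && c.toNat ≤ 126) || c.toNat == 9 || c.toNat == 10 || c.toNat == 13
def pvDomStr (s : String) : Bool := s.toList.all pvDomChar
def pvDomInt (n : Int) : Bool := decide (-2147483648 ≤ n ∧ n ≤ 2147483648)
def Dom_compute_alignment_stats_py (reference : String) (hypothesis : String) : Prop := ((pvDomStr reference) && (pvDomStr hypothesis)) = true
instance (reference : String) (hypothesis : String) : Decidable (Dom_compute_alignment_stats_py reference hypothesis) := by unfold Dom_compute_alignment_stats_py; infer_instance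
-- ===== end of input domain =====

-- B replaces the backpointer matrix and the traceback loop by a single forward DP pass over a
-- rolling row of (cost, alignment_length, matches) triples with the same strict-less move priority.

-- ===== PORT A =====
-- A's per-cell choice: best_cost = substitution, then deletion if strictly smaller, then insertion if strictly smaller
def pvChain (sub del ins : Int) (mt : Bool) : Int × String :=
  let b1 := sub
  let o1 := if mt then "M" else "S"
  let b2 := if del < b1 then del else b1
  let o2 := if del < b1 then "D" else o1
  if ins < b2 then (ins, "I") else (b2, o2)

-- inner j-loop of A's fill: walks hypothesis and the previous row in step, carrying diag and the cell to the left
def pvA_row (rc : Char) : List Char → List Int → Int → Int → List Int × List String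
  | hc :: hyp', up :: prev', diag, left =>
      let mt := rc == hc
      let bo := pvChain (diag + (if mt then 0 else 1)) (up + 1) (left + 1) mt
      let rb := pvA_row rc hyp' prev' up bo.1
      (bo.1 :: rb.1, bo.2 :: rb.2)
  | _, _, _, _ => ([], [])

-- outer i-loop of A's fill: dp[i][0] = i, back[i][0] = "D", then the inner loop over j
def pvA_fill (hyp : List Char) : List Char → Int → List Int → List (List Int) × List (List String)
  | [], _, _ => ([], [])
  | rc :: rest, i, prevRow =>
      let rb := match prevRow with
        | p0 :: ps => pvA_row rc hyp ps p0 i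
        | [] => ([], [])
      let curD := i :: rb.1
      let curB := "D" :: rb.2
      let tl := pvA_fill hyp rest (i + 1) curD
      (curD :: tl.1, curB :: tl.2)

-- A's while-loop traceback over the back matrix; fuel = i + j (each step decreases i + j by at least 1)
def pvA_trace (back : List (List String)) : Nat → Nat → Nat → Int → Int → Int × Int
  | 0, _, _, al, m => (al, m)
  | fuel + 1, i, j, al, m =>
    if i = 0 ∧ j = 0 then (al, m)
    else
      let op := (back.getD i []).getD j ""
      if op = "M" then pvA_trace back fuel (i - 1) (j - 1) (al + 1) (m + 1)
      else if op = "S" then pvA_trace back fuel (i - 1) (j - 1) (al + 1) m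
      else if op = "D" then pvA_trace back fuel (i - 1) j (al + 1) m
      else if op = "I" then pvA_trace back fuel i (j - 1) (al + 1) m
      else (al, m)

def compute_alignment_stats_py (reference : String) (hypothesis : String) : Int × Int × Int × Int :=
  let refc := reference.toList
  let hypc := hypothesis.toList
  let ref_len := refc.length
  let hyp_len := hypc.length
  if ref_len = 0 ∧ hyp_len = 0 then (0, 0, 0, 0)
  else
    let row0 : List Int := (List.range (hyp_len + 1)).map Int.ofNat
    let back0 : List String := "" :: List.replicate hyp_len "I"
    let fb := pvA_fill hypc refc 1 row0
    let dp := row0 :: fb.1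
    let back := back0 :: fb.2
    let distance := (dp.getD ref_len []).getD hyp_len 0
    let am := pvA_trace back (ref_len + hyp_len) ref_len hyp_len 0 0
    (distance, am.1, am.2, (ref_len : Int))

-- ===== PORT B =====
-- B's per-cell step: pick the predecessor with A's strict-less priority and extend its
-- (cost, alignment_length, matches) triple
def pvCell (diag up left : Int × Int × Int) (mt : Bool) : Int × Int × Int :=
  let sub := diag.1 + (if mt then 0 else 1)
  let del := up.1 + 1
  let ins := left.1 + 1
  if ins < sub ∧ ins < del then (ins, left.2.1 + 1, left.2.2)
  else if del < sub then (del, up.2.1 + 1, up.2.2)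
  else (sub, diag.2.1 + 1, diag.2.2 + (if mt then 1 else 0))

-- inner j-loop of B: walks hypothesis and the previous row of triples, carrying diag and left
def pvB_row (rc : Char) : List Char → List (Int × Int × Int) → (Int × Int × Int) → (Int × Int × Int) → List (Int × Int × Int)
  | hc :: hyp', up :: prev', diag, left =>
      let c := pvCell diag up left (rc == hc)
      c :: pvB_row rc hyp' prev' up c
  | _, _, _, _ => []

-- outer i-loop of B: rolling row, returns the final row
def pvB_fill (hyp : List Char) : List Char → Int → List (Int × Int × Int) → List (Int × Int × Int)
  | [], _, prev => prev
  | rc :: rest, i, prev =>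
      let cur := ((i, i, 0) : Int × Int × Int) :: (match prev with
        | p0 :: ps => pvB_row rc hyp ps p0 (i, i, 0)
        | [] => [])
      pvB_fill hyp rest (i + 1) cur

def compute_alignment_stats_py_alt (reference : String) (hypothesis : String) : Int × Int × Int × Int :=
  let refc := reference.toList
  let hypc := hypothesis.toList
  let ref_len := refc.length
  let hyp_len := hypc.length
  let row0 : List (Int × Int × Int) := (List.range (hyp_len + 1)).map (fun (j : Nat) => ((j : Int), (j : Int), (0 : Int)))
  let fin := pvB_fill hypc refc 1 row0
  let c := fin.getD hyp_len (0, 0, 0)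
  (c.1, c.2.1, c.2.2, (ref_len : Int))

-- ===== PRECONDITION & SPEC =====
def Spec_compute_alignment_stats_py (reference : String) (hypothesis : String) (out : Int × Int × Int × Int) : Prop := out = compute_alignment_stats_py_alt reference hypothesis
instance (reference : String) (hypothesis : String) (out : Int × Int × Int × Int) : Decidable (Spec_compute_alignment_stats_py reference hypothesis out) := by unfold Spec_compute_alignment_stats_py; infer_instance

-- ===== CLAIM (what is proved, stated in full; the proofs are below) =====
def Claim_equal_compute_alignment_stats_py : Prop := ∀ (reference : String) (hypothesis : String), Dom_compute_alignment_stats_py reference hypothesis → Spec_compute_alignment_stats_py reference hypothesis (compute_alignment_stats_py reference hypothesis)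

-- ===== LEMMAS AND PROOFS =====

theorem pvChain_eq (s d i : Int) (mt : Bool) :
    pvChain s d i mt =
      (min (min s d) i,
       if i < s ∧ i < d then "I" else if d < s then "D" else if mt then "M" else "S") := by
  simp only [pvChain]
  rcases lt_or_ge d s with h1 | h1
  · rw [if_pos h1, if_pos h1]
    rcases lt_or_ge i d with h2 | h2
    · rw [if_pos h2]
      have hm : min (min s d) i = i := by omega
      rw [hm, if_pos ⟨by omega, h2⟩]
    · rw [if_neg (not_lt.mpr h2)]
      have hm : min (min s d) i = d := by omega
      rw [hm, if_neg (show ¬(i < s ∧ i < d) from fun hc => absurd hc.2 (not_lt.mpr h2))]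
  · rw [if_neg (not_lt.mpr h1), if_neg (not_lt.mpr h1)]
    rcases lt_or_ge i s with h2 | h2
    · rw [if_pos h2]
      have hm : min (min s d) i = i := by omega
      rw [hm, if_pos ⟨h2, by omega⟩]
    · rw [if_neg (not_lt.mpr h2)]
      have hm : min (min s d) i = s := by omega
      rw [hm, if_neg (show ¬(i < s ∧ i < d) from fun hc => absurd hc.1 (not_lt.mpr h2))]

theorem pvA_row_len (rc : Char) : ∀ (hyp : List Char) (prev : List Int) (diag left : Int),
    hyp.length = prev.length →
    (pvA_row rc hyp prev diag left).1.length = hyp.length ∧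
    (pvA_row rc hyp prev diag left).2.length = hyp.length := by
  intro hyp
  induction hyp with
  | nil => intro prev diag left _; simp [pvA_row]
  | cons hc hyp' ih =>
    intro prev diag left h
    cases prev with
    | nil => simp at h
    | cons up prev' =>
      have h' : hyp'.length = prev'.length := by simpa using h
      simp only [pvA_row, List.length_cons]
      exact ⟨by simp [(ih prev' up _ h').1], by simp [(ih prev' up _ h').2]⟩

-- row-level characterisation: cell k of the back row is pvChain applied to the dp neighbours
theorem pvA_row_cells (rc : Char) : ∀ (hyp : List Char) (prev : List Int) (diag left : Int),
    hyp.length = prev.length →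
    ∀ k, k < hyp.length →
      (pvA_row rc hyp prev diag left).2.getD k "" =
        (pvChain ((diag :: prev).getD k 0 + (if (rc == hyp.getD k ' ') then 0 else 1))
                 (prev.getD k 0 + 1)
                 ((left :: (pvA_row rc hyp prev diag left).1).getD k 0 + 1)
                 (rc == hyp.getD k ' ')).2 := by
  intro hyp
  induction hyp with
  | nil => intro prev diag left _ k hk; simp at hk
  | cons hc hyp' ih =>
    intro prev diag left h k hk
    cases prev with
    | nil => simp at h
    | cons up prev' =>
      cases k with
      | zero => simp [pvA_row]
      | succ k' =>
        have h' : hyp'.length = prev'.length := by simpa using h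
        have hk' : k' < hyp'.length := by simpa using hk
        simp only [pvA_row, List.getD_cons_succ]
        exact ih prev' up _ h' k' hk'

-- interior invariant of A's fill: back cell (a, k+1) is pvChain of the dp neighbours
theorem pvA_fill_inv (hyp : List Char) : ∀ (refs : List Char) (i : Int) (prevRow : List Int),
    prevRow.length = hyp.length + 1 →
    (∀ a, a < refs.length → ((pvA_fill hyp refs i prevRow).1.getD a []).length = hyp.length + 1) ∧
    (∀ a, a < refs.length → ((pvA_fill hyp refs i prevRow).2.getD a []).getD 0 "" = "D") ∧
    (∀ a, a < refs.length → ∀ k, k < hyp.length →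
      ((pvA_fill hyp refs i prevRow).2.getD a []).getD (k + 1) "" =
        (pvChain (((prevRow :: (pvA_fill hyp refs i prevRow).1).getD a []).getD k 0
                    + (if (refs.getD a ' ' == hyp.getD k ' ') then 0 else 1))
                 (((prevRow :: (pvA_fill hyp refs i prevRow).1).getD a []).getD (k + 1) 0 + 1)
                 (((prevRow :: (pvA_fill hyp refs i prevRow).1).getD (a + 1) []).getD k 0 + 1)
                 (refs.getD a ' ' == hyp.getD k ' ')).2) := by
  intro refs
  induction refs with
  | nil =>
    intro i prevRow _
    refine ⟨?_, ?_, ?_⟩ <;> intro a ha <;> simp at ha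
  | cons rc rest ih =>
    intro i prevRow hlen
    cases prevRow with
    | nil => simp at hlen
    | cons p0 ps =>
      have hps : hyp.length = ps.length := by simpa using hlen.symm
      have hrow := pvA_row_len rc hyp ps p0 i hps
      have hcur : (i :: (pvA_row rc hyp ps p0 i).1).length = hyp.length + 1 := by
        simp [hrow.1]
      obtain ⟨ih1, ih2, ih3⟩ := ih (i + 1) (i :: (pvA_row rc hyp ps p0 i).1) hcur
      refine ⟨?_, ?_, ?_⟩
      · intro a ha
        cases a with
        | zero => simpa [pvA_fill] using hcur
        | succ a' =>
          simp only [pvA_fill, List.getD_cons_succ]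
          exact ih1 a' (by simpa using ha)
      · intro a ha
        cases a with
        | zero => simp [pvA_fill]
        | succ a' =>
          simp only [pvA_fill, List.getD_cons_succ]
          exact ih2 a' (by simpa using ha)
      · intro a ha k hk
        cases a with
        | zero =>
          simp only [pvA_fill, List.getD_cons_zero, List.getD_cons_succ]
          exact pvA_row_cells rc hyp ps p0 i hps k hk
        | succ a' =>
          simp only [pvA_fill, List.getD_cons_succ]
          exact ih3 a' (by simpa using ha) k hk

theorem pv_back0_I (H : Nat) : ∀ j, 1 ≤ j → j ≤ H →
    (("" :: List.replicate H "I") : List String).getD j "" = "I" := by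
  intro j h1 h2
  cases j with
  | zero => omega
  | succ j' =>
    simp only [List.getD_cons_succ]
    rw [List.getD_eq_getElem?_getD, List.getElem?_replicate]
    simp [Nat.lt_of_succ_le h2]

-- ---- B-side structure ----

-- the matrix of rows B's rolling fill passes through (proof-side only)
def pvB_mat (hyp : List Char) : List Char → Int → List (Int × Int × Int) → List (List (Int × Int × Int))
  | [], _, _ => []
  | rc :: rest, i, prev =>
      let cur := ((i, i, 0) : Int × Int × Int) :: (match prev with
        | p0 :: ps => pvB_row rc hyp ps p0 (i, i, 0)
        | [] => [])
      cur :: pvB_mat hyp rest (i + 1) cur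

theorem pvB_fill_eq_mat (hyp : List Char) : ∀ (refs : List Char) (i : Int) (prev : List (Int × Int × Int)),
    pvB_fill hyp refs i prev = (prev :: pvB_mat hyp refs i prev).getD refs.length [] := by
  intro refs
  induction refs with
  | nil => intro i prev; simp [pvB_fill, pvB_mat]
  | cons rc rest ih =>
    intro i prev
    simp only [pvB_fill, pvB_mat, List.length_cons, List.getD_cons_succ]
    exact ih (i + 1) _

theorem pvB_mat_length (hyp : List Char) : ∀ (refs : List Char) (i : Int) (prev : List (Int × Int × Int)),
    (pvB_mat hyp refs i prev).length = refs.length := by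
  intro refs
  induction refs with
  | nil => intro i prev; simp [pvB_mat]
  | cons rc rest ih => intro i prev; simp only [pvB_mat, List.length_cons, ih]

theorem pvB_row_len (rc : Char) : ∀ (hyp : List Char) (prev : List (Int × Int × Int)) (diag left : Int × Int × Int),
    hyp.length = prev.length →
    (pvB_row rc hyp prev diag left).length = hyp.length := by
  intro hyp
  induction hyp with
  | nil => intro prev diag left _; cases prev <;> simp [pvB_row]
  | cons hc hyp' ih =>
    intro prev diag left h
    cases prev with
    | nil => simp at h
    | cons up prev' =>
      have h' : hyp'.length = prev'.length := by simpa using h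
      simp only [pvB_row, List.length_cons, ih prev' up _ h']

theorem pvB_row_cells (rc : Char) : ∀ (hyp : List Char) (prev : List (Int × Int × Int)) (diag left : Int × Int × Int),
    hyp.length = prev.length →
    ∀ k, k < hyp.length →
      (pvB_row rc hyp prev diag left).getD k (0, 0, 0) =
        pvCell ((diag :: prev).getD k (0, 0, 0)) (prev.getD k (0, 0, 0))
               ((left :: pvB_row rc hyp prev diag left).getD k (0, 0, 0))
               (rc == hyp.getD k ' ') := by
  intro hyp
  induction hyp with
  | nil => intro prev diag left _ k hk; simp at hk
  | cons hc hyp' ih =>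
    intro prev diag left h k hk
    cases prev with
    | nil => simp at h
    | cons up prev' =>
      cases k with
      | zero => simp [pvB_row]
      | succ k' =>
        have h' : hyp'.length = prev'.length := by simpa using h
        have hk' : k' < hyp'.length := by simpa using hk
        simp only [pvB_row, List.getD_cons_succ]
        exact ih prev' up _ h' k' hk'

theorem pvB_mat_inv (hyp : List Char) : ∀ (refs : List Char) (i : Int) (prevRow : List (Int × Int × Int)),
    prevRow.length = hyp.length + 1 →
    (∀ a, a < refs.length → ((pvB_mat hyp refs i prevRow).getD a []).length = hyp.length + 1) ∧
    (∀ a, a < refs.length → ((pvB_mat hyp refs i prevRow).getD a []).getD 0 (0, 0, 0) = (i + (a : Int), i + (a : Int), 0)) ∧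
    (∀ a, a < refs.length → ∀ k, k < hyp.length →
      ((pvB_mat hyp refs i prevRow).getD a []).getD (k + 1) (0, 0, 0) =
        pvCell (((prevRow :: pvB_mat hyp refs i prevRow).getD a []).getD k (0, 0, 0))
               (((prevRow :: pvB_mat hyp refs i prevRow).getD a []).getD (k + 1) (0, 0, 0))
               (((prevRow :: pvB_mat hyp refs i prevRow).getD (a + 1) []).getD k (0, 0, 0))
               (refs.getD a ' ' == hyp.getD k ' ')) := by
  intro refs
  induction refs with
  | nil =>
    intro i prevRow _
    refine ⟨?_, ?_, ?_⟩ <;> intro a ha <;> simp at ha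
  | cons rc rest ih =>
    intro i prevRow hlen
    cases prevRow with
    | nil => simp at hlen
    | cons p0 ps =>
      have hps : hyp.length = ps.length := by simpa using hlen.symm
      have hrow := pvB_row_len rc hyp ps p0 (i, i, 0) hps
      have hcur : (((i, i, 0) : Int × Int × Int) :: pvB_row rc hyp ps p0 (i, i, 0)).length = hyp.length + 1 := by
        simp [hrow]
      obtain ⟨ih1, ih2, ih3⟩ := ih (i + 1) (((i, i, 0) : Int × Int × Int) :: pvB_row rc hyp ps p0 (i, i, 0)) hcur
      refine ⟨?_, ?_, ?_⟩
      · intro a ha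
        cases a with
        | zero => simpa [pvB_mat] using hcur
        | succ a' =>
          simp only [pvB_mat, List.getD_cons_succ]
          exact ih1 a' (by simpa using ha)
      · intro a ha
        cases a with
        | zero => simp [pvB_mat]
        | succ a' =>
          simp only [pvB_mat, List.getD_cons_succ]
          rw [ih2 a' (by simpa using ha)]
          simp only [Prod.mk.injEq]
          refine ⟨by push_cast; ring, by push_cast; ring, trivial⟩
      · intro a ha k hk
        cases a with
        | zero =>
          simp only [pvB_mat, List.getD_cons_zero, List.getD_cons_succ]
          exact pvB_row_cells rc hyp ps p0 (i, i, 0) hps k hk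
        | succ a' =>
          simp only [pvB_mat, List.getD_cons_succ]
          exact ih3 a' (by simpa using ha) k hk

-- ---- cost correspondence: first components of B's triples are A's dp entries ----

theorem pvCell_fst (diag up left : Int × Int × Int) (mt : Bool) :
    (pvCell diag up left mt).1 =
      (pvChain (diag.1 + (if mt then 0 else 1)) (up.1 + 1) (left.1 + 1) mt).1 := by
  simp only [pvCell, pvChain_eq]
  split_ifs <;> omega

theorem pvB_row_fst (rc : Char) : ∀ (hyp : List Char) (prev : List (Int × Int × Int)) (diag left : Int × Int × Int),
    (pvB_row rc hyp prev diag left).map Prod.fst = (pvA_row rc hyp (prev.map Prod.fst) diag.1 left.1).1 := by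
  intro hyp
  induction hyp with
  | nil => intro prev diag left; cases prev <;> simp [pvB_row, pvA_row]
  | cons hc hyp' ih =>
    intro prev diag left
    cases prev with
    | nil => simp [pvB_row, pvA_row]
    | cons up prev' =>
      simp only [pvB_row, pvA_row, List.map_cons]
      rw [ih prev' up _, pvCell_fst]

theorem pvB_mat_fst (hyp : List Char) : ∀ (refs : List Char) (i : Int) (prev : List (Int × Int × Int)),
    (pvB_mat hyp refs i prev).map (List.map Prod.fst) = (pvA_fill hyp refs i (prev.map Prod.fst)).1 := by
  intro refs
  induction refs with
  | nil => intro i prev; simp [pvB_mat, pvA_fill]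
  | cons rc rest ih =>
    intro i prev
    cases prev with
    | nil =>
      have htl := ih (i + 1) [((i, i, 0) : Int × Int × Int)]
      simp only [List.map_cons, List.map_nil] at htl
      simp only [pvB_mat, pvA_fill, List.map_cons, List.map_nil, htl]
    | cons p0 ps =>
      have hrow := pvB_row_fst rc hyp ps p0 ((i, i, 0) : Int × Int × Int)
      have htl := ih (i + 1) (((i, i, 0) : Int × Int × Int) :: pvB_row rc hyp ps p0 (i, i, 0))
      simp only [List.map_cons, hrow] at htl
      simp only [pvB_mat, pvA_fill, List.map_cons, hrow, htl]

theorem pv_getD_map_fst : ∀ (l : List (Int × Int × Int)) (j : Nat), j < l.length →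
    (l.map Prod.fst).getD j 0 = (l.getD j (0, 0, 0)).1 := by
  intro l
  induction l with
  | nil => intro j hj; simp at hj
  | cons x xs ih =>
    intro j hj
    cases j with
    | zero => simp
    | succ j' => simpa using ih j' (by simpa using hj)

theorem pv_row0B_getD (H : Nat) : ∀ j, j ≤ H →
    (((List.range (H + 1)).map (fun (j : Nat) => ((j : Int), (j : Int), (0 : Int)))).getD j (0, 0, 0)) = ((j : Int), (j : Int), 0) := by
  intro j hj
  rw [List.getD_eq_getElem?_getD, List.getElem?_map, List.getElem?_range (by omega)]
  simp

-- single steps of A's traceback, one per opcode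
theorem pv_stepM (back : List (List String)) (fuel i j : Nat) (al m : Int)
    (h00 : ¬(i = 0 ∧ j = 0)) (hop : (back.getD i []).getD j "" = "M") :
    pvA_trace back (fuel + 1) i j al m = pvA_trace back fuel (i - 1) (j - 1) (al + 1) (m + 1) := by
  have hop' : (back[i]?.getD [])[j]?.getD "" = "M" := by
    simpa [List.getD_eq_getElem?_getD] using hop
  simp [pvA_trace, h00, hop']

theorem pv_stepS (back : List (List String)) (fuel i j : Nat) (al m : Int)
    (h00 : ¬(i = 0 ∧ j = 0)) (hop : (back.getD i []).getD j "" = "S") :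
    pvA_trace back (fuel + 1) i j al m = pvA_trace back fuel (i - 1) (j - 1) (al + 1) m := by
  have hop' : (back[i]?.getD [])[j]?.getD "" = "S" := by
    simpa [List.getD_eq_getElem?_getD] using hop
  simp [pvA_trace, h00, hop']

theorem pv_stepD (back : List (List String)) (fuel i j : Nat) (al m : Int)
    (h00 : ¬(i = 0 ∧ j = 0)) (hop : (back.getD i []).getD j "" = "D") :
    pvA_trace back (fuel + 1) i j al m = pvA_trace back fuel (i - 1) j (al + 1) m := by
  have hop' : (back[i]?.getD [])[j]?.getD "" = "D" := by
    simpa [List.getD_eq_getElem?_getD] using hop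
  simp [pvA_trace, h00, hop']

theorem pv_stepI (back : List (List String)) (fuel i j : Nat) (al m : Int)
    (h00 : ¬(i = 0 ∧ j = 0)) (hop : (back.getD i []).getD j "" = "I") :
    pvA_trace back (fuel + 1) i j al m = pvA_trace back fuel i (j - 1) (al + 1) m := by
  have hop' : (back[i]?.getD [])[j]?.getD "" = "I" := by
    simpa [List.getD_eq_getElem?_getD] using hop
  simp [pvA_trace, h00, hop']

-- ---- the main bridge: A's traceback computes exactly the stats B propagates forward ----

set_option maxHeartbeats 1600000 in
theorem pv_trace_stats (back : List (List String)) (mat : List (List (Int × Int × Int)))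
    (refc hypc : List Char) (R H : Nat)
    (hstat0 : ∀ j, j ≤ H → (mat.getD 0 []).getD j (0, 0, 0) = ((j : Int), (j : Int), 0))
    (hstatC : ∀ i, i ≤ R → (mat.getD i []).getD 0 (0, 0, 0) = ((i : Int), (i : Int), 0))
    (hstatI : ∀ i j, 1 ≤ i → i ≤ R → 1 ≤ j → j ≤ H →
      (mat.getD i []).getD j (0, 0, 0) =
        pvCell ((mat.getD (i - 1) []).getD (j - 1) (0, 0, 0))
               ((mat.getD (i - 1) []).getD j (0, 0, 0))
               ((mat.getD i []).getD (j - 1) (0, 0, 0))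
               (refc.getD (i - 1) ' ' == hypc.getD (j - 1) ' '))
    (hback : ∀ i j, 1 ≤ i → i ≤ R → 1 ≤ j → j ≤ H →
      (back.getD i []).getD j "" =
        (pvChain (((mat.getD (i - 1) []).getD (j - 1) (0, 0, 0)).1
                    + (if (refc.getD (i - 1) ' ' == hypc.getD (j - 1) ' ') then 0 else 1))
                 (((mat.getD (i - 1) []).getD j (0, 0, 0)).1 + 1)
                 (((mat.getD i []).getD (j - 1) (0, 0, 0)).1 + 1)
                 (refc.getD (i - 1) ' ' == hypc.getD (j - 1) ' ')).2)
    (hD : ∀ i, 1 ≤ i → i ≤ R → (back.getD i []).getD 0 "" = "D")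
    (hIop : ∀ j, 1 ≤ j → j ≤ H → (back.getD 0 []).getD j "" = "I") :
    ∀ fuel i j al m, i ≤ R → j ≤ H → i + j ≤ fuel →
      pvA_trace back fuel i j al m =
        (al + ((mat.getD i []).getD j (0, 0, 0)).2.1, m + ((mat.getD i []).getD j (0, 0, 0)).2.2) := by
  intro fuel
  induction fuel with
  | zero =>
    intro i j al m hiR hjH hf
    have hi0 : i = 0 := by omega
    have hj0 : j = 0 := by omega
    subst hi0; subst hj0
    rw [hstat0 0 (Nat.zero_le _)]
    simp [pvA_trace]
  | succ fuel ihf =>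
    intro i j al m hiR hjH hf
    by_cases h00 : i = 0 ∧ j = 0
    · obtain ⟨hi0, hj0⟩ := h00
      subst hi0; subst hj0
      rw [hstat0 0 (Nat.zero_le _)]
      simp [pvA_trace]
    · by_cases hij : 1 ≤ i ∧ 1 ≤ j
      · obtain ⟨h1i, h1j⟩ := hij
        have hop := hback i j h1i hiR h1j hjH
        rw [pvChain_eq] at hop
        have hcell := hstatI i j h1i hiR h1j hjH
        simp only [pvCell] at hcell
        set Dg := (mat.getD (i - 1) []).getD (j - 1) (0, 0, 0) with hDg
        set Up := (mat.getD (i - 1) []).getD j (0, 0, 0) with hUp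
        set Lf := (mat.getD i []).getD (j - 1) (0, 0, 0) with hLf
        set mt := (refc.getD (i - 1) ' ' == hypc.getD (j - 1) ' ') with hmtd
        by_cases hC1 : Lf.1 + 1 < Dg.1 + (if mt = true then 0 else 1) ∧ Lf.1 + 1 < Up.1 + 1
        · rw [if_pos hC1] at hop hcell
          rw [pv_stepI back fuel i j al m h00 hop]
          rw [ihf i (j - 1) (al + 1) m hiR (by omega) (by omega), hcell, ← hLf]
          simp <;> omega
        · rw [if_neg hC1] at hop hcell
          by_cases hC2 : Up.1 + 1 < Dg.1 + (if mt = true then 0 else 1)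
          · rw [if_pos hC2] at hop hcell
            rw [pv_stepD back fuel i j al m h00 hop]
            rw [ihf (i - 1) j (al + 1) m (by omega) hjH (by omega), hcell, ← hUp]
            simp <;> omega
          · rw [if_neg hC2] at hop hcell
            by_cases hC3 : mt = true
            · simp only [if_pos hC3] at hop hcell
              rw [pv_stepM back fuel i j al m h00 hop]
              rw [ihf (i - 1) (j - 1) (al + 1) (m + 1) (by omega) (by omega) (by omega), hcell, ← hDg]
              simp <;> omega
            · simp only [if_neg hC3] at hop hcell
              rw [pv_stepS back fuel i j al m h00 hop]
              rw [ihf (i - 1) (j - 1) (al + 1) m (by omega) (by omega) (by omega), hcell, ← hDg]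
              simp <;> omega
      · by_cases hi : 1 ≤ i
        · have hj0 : j = 0 := by omega
          subst hj0
          have hop := hD i hi hiR
          rw [pv_stepD back fuel i 0 al m h00 hop]
          rw [ihf (i - 1) 0 (al + 1) m (by omega) (Nat.zero_le _) (by omega),
              hstatC (i - 1) (by omega), hstatC i hiR]
          simp <;> omega
        · have hi0 : i = 0 := by omega
          subst hi0
          have h1j : 1 ≤ j := by omega
          have hop := hIop j h1j hjH
          rw [pv_stepI back fuel 0 j al m h00 hop]
          rw [ihf 0 (j - 1) (al + 1) m (Nat.zero_le _) (by omega) (by omega),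
              hstat0 (j - 1) (by omega), hstat0 j hjH]
          simp <;> omega

-- ===== VERDICT (by name: the statement is the Claim_ definition above) =====
set_option maxHeartbeats 1600000 in
theorem compute_alignment_stats_py_spec : Claim_equal_compute_alignment_stats_py := by
  intro reference hypothesis _
  show compute_alignment_stats_py reference hypothesis = compute_alignment_stats_py_alt reference hypothesis
  unfold compute_alignment_stats_py compute_alignment_stats_py_alt
  dsimp only
  set refc := reference.toList with hrefc
  set hypc := hypothesis.toList with hhypc
  set R := refc.length with hR
  set H := hypc.length with hH
  by_cases h0 : R = 0 ∧ H = 0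
  · obtain ⟨hr0, hh0⟩ := h0
    have hre : refc = [] := List.eq_nil_of_length_eq_zero hr0
    have hhe : hypc = [] := List.eq_nil_of_length_eq_zero hh0
    simp [hr0, hh0, hre, hhe, pvB_fill, List.range_succ]
  · rw [if_neg (show ¬(refc.length = 0 ∧ hypc.length = 0) from h0)]
    set row0 : List Int := (List.range (H + 1)).map Int.ofNat with hrow0
    set row0B : List (Int × Int × Int) :=
      (List.range (H + 1)).map (fun (j : Nat) => ((j : Int), (j : Int), (0 : Int))) with hrow0B
    have hrow0B_len : row0B.length = H + 1 := by simp [hrow0B]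
    have hmap0 : row0B.map Prod.fst = row0 := by
      simp [hrow0, hrow0B, List.map_map, Function.comp_def, Int.ofNat_eq_natCast]
    obtain ⟨hAlen, hDcol, hInt⟩ := pvA_fill_inv hypc refc 1 row0 (by simp [hrow0, hH])
    obtain ⟨hBlen, hBcol, hBint⟩ := pvB_mat_inv hypc refc 1 row0B (by simp [hrow0B, hH])
    rw [pvB_fill_eq_mat]
    set fb := pvA_fill hypc refc 1 row0 with hfb
    set matB := pvB_mat hypc refc 1 row0B with hmatB
    set dp := row0 :: fb.1 with hdp
    set mat := row0B :: matB with hmat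
    set back := ("" :: List.replicate H "I") :: fb.2 with hback
    have hdp_eq : dp = mat.map (List.map Prod.fst) := by
      rw [hdp, hmat, List.map_cons, hmap0, hmatB, pvB_mat_fst, hmap0, hfb]
    have hmatlen : mat.length = R + 1 := by
      rw [hmat]; simp [hmatB, pvB_mat_length, hR]
    have hrowlen : ∀ p, p ≤ R → (mat.getD p []).length = H + 1 := by
      intro p hp
      cases p with
      | zero => simpa [hmat] using hrow0B_len
      | succ a => simpa [hmat] using hBlen a (by omega)
    have hcellF : ∀ p q : Nat, p ≤ R → q ≤ H →
        (dp.getD p []).getD q 0 = ((mat.getD p []).getD q (0, 0, 0)).1 := by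
      intro p q hp hq
      have hplt : p < mat.length := by omega
      have hrow : dp.getD p [] = (mat.getD p []).map Prod.fst := by
        rw [hdp_eq, List.getD_eq_getElem?_getD, List.getElem?_map,
            List.getD_eq_getElem?_getD (l := mat), List.getElem?_eq_getElem hplt]
        simp
      rw [hrow]
      exact pv_getD_map_fst _ q (by rw [hrowlen p hp]; omega)
    have hstat0 : ∀ j, j ≤ H → (mat.getD 0 []).getD j (0, 0, 0) = ((j : Int), (j : Int), 0) := by
      intro j hj
      simpa [hmat, hrow0B] using pv_row0B_getD H j hj
    have hstatC : ∀ i, i ≤ R → (mat.getD i []).getD 0 (0, 0, 0) = ((i : Int), (i : Int), 0) := by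
      intro i hi
      cases i with
      | zero => simpa using hstat0 0 (Nat.zero_le _)
      | succ a =>
        have := hBcol a (by omega)
        rw [hmat]
        simp only [List.getD_cons_succ]
        rw [this]
        simp only [Prod.mk.injEq]
        refine ⟨by push_cast; ring, by push_cast; ring, trivial⟩
    have hstatI : ∀ i j, 1 ≤ i → i ≤ R → 1 ≤ j → j ≤ H →
        (mat.getD i []).getD j (0, 0, 0) =
          pvCell ((mat.getD (i - 1) []).getD (j - 1) (0, 0, 0))
                 ((mat.getD (i - 1) []).getD j (0, 0, 0))
                 ((mat.getD i []).getD (j - 1) (0, 0, 0))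
                 (refc.getD (i - 1) ' ' == hypc.getD (j - 1) ' ') := by
      intro i j h1i hiR h1j hjH
      cases i with
      | zero => omega
      | succ a =>
        cases j with
        | zero => omega
        | succ k =>
          have := hBint a (by omega) k (by omega)
          simpa [hmat] using this
    have hbackH : ∀ i j, 1 ≤ i → i ≤ R → 1 ≤ j → j ≤ H →
        (back.getD i []).getD j "" =
          (pvChain (((mat.getD (i - 1) []).getD (j - 1) (0, 0, 0)).1
                      + (if (refc.getD (i - 1) ' ' == hypc.getD (j - 1) ' ') then 0 else 1))
                   (((mat.getD (i - 1) []).getD j (0, 0, 0)).1 + 1)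
                   (((mat.getD i []).getD (j - 1) (0, 0, 0)).1 + 1)
                   (refc.getD (i - 1) ' ' == hypc.getD (j - 1) ' ')).2 := by
      intro i j h1i hiR h1j hjH
      have hbd : (back.getD i []).getD j "" =
          (pvChain ((dp.getD (i - 1) []).getD (j - 1) 0
                      + (if (refc.getD (i - 1) ' ' == hypc.getD (j - 1) ' ') then 0 else 1))
                   ((dp.getD (i - 1) []).getD j 0 + 1)
                   ((dp.getD i []).getD (j - 1) 0 + 1)
                   (refc.getD (i - 1) ' ' == hypc.getD (j - 1) ' ')).2 := by
        cases i with
        | zero => omega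
        | succ a =>
          cases j with
          | zero => omega
          | succ k =>
            have := hInt a (by omega) k (by omega)
            simpa [hback, hdp] using this
      rw [hbd, hcellF (i - 1) (j - 1) (by omega) (by omega), hcellF (i - 1) j (by omega) hjH,
          hcellF i (j - 1) hiR (by omega)]
    have hDb : ∀ i, 1 ≤ i → i ≤ R → (back.getD i []).getD 0 "" = "D" := by
      intro i h1 h2
      cases i with
      | zero => omega
      | succ a => simpa [hback] using hDcol a (by omega)
    have hIb : ∀ j, 1 ≤ j → j ≤ H → (back.getD 0 []).getD j "" = "I" := by
      intro j h1 h2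
      simpa [hback] using pv_back0_I H j h1 h2
    have htr := pv_trace_stats back mat refc hypc R H hstat0 hstatC hstatI hbackH hDb hIb
      (R + H) R H 0 0 (Nat.le_refl R) (Nat.le_refl H) (Nat.le_refl _)
    rw [htr, hcellF R H (Nat.le_refl R) (Nat.le_refl H)]
    have hfin : (row0B :: matB).getD R [] = mat.getD R [] := by rw [hmat]
    rw [hfin]
    simp
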